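-- pv_equiv track=rewrite | github.com/Ploux/ga-text-gen | sentence.py | bigramify
-- ===== SOURCE A (Python) =====
-- def bigramify(sentences, corpus, bigrams):
--     # loop through the sentences
--     for sentence in sentences:
--         # loop through the sentence
--         for i in range(len(sentence) - 1):
--             # if word is in corpus
--             if sentence[i] in corpus:
--                 # look through the bigram dictionary and check all the bigrams starting with that word in order of frequency
--                 for bigram in bigrams:
--                     if bigram[0] == sentence[i]:
--                         # search the test sentence for the second word of the bigram
--                         # if it is found, swap the next word in the test sentence with the second word of the bigram
--                         # and continue looping through the test sentence
--                         if bigram[1] in sentence[i+1:]: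
--                             # swap the words
--                             index_to_swap = i + 1 + sentence[i+1:].index(bigram[1])
--                             sentence[i+1], sentence[index_to_swap] = sentence[index_to_swap], sentence[i+1]
--                             break
--     return sentences
-- ===== SOURCE B (Python) =====
-- def bigramify(sentences, corpus, bigrams):
--     # Rank table: earliest position of each bigram pair (first write wins).
--     rank = {}
--     for idx, pair in enumerate(bigrams):
--         if pair not in rank:
--             rank[pair] = idx
--     corpus_set = set(corpus)
--     result = []
--     for old in sentences:
--         sentence = list(old)
--         for i in range(len(sentence) - 1):
--             w = sentence[i]
--             if w in corpus_set:
--                 rest = sentence[i+1:]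
--                 best = None
--                 best_r = None
--                 for cand in rest:
--                     r = rank.get((w, cand))
--                     if r is not None and (best_r is None or r < best_r):
--                         best, best_r = cand, r
--                 if best is not None:
--                     j = i + 1 + rest.index(best)
--                     sentence[i+1], sentence[j] = sentence[j], sentence[i+1]
--         result.append(sentence)
--     return result
-- ===== Notes on version B (the rewrite author's own statement) =====
-- stated objective: faster
-- what changed: A rescans the whole bigram list (first match wins) at every sentence position; B precomputes a dict mapping each bigram pair to its earliest index once, then at each position scans only the remaining words for the minimum-rank candidate, and B builds fresh sentence lists instead of mutating them in place.
import Mathlib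
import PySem

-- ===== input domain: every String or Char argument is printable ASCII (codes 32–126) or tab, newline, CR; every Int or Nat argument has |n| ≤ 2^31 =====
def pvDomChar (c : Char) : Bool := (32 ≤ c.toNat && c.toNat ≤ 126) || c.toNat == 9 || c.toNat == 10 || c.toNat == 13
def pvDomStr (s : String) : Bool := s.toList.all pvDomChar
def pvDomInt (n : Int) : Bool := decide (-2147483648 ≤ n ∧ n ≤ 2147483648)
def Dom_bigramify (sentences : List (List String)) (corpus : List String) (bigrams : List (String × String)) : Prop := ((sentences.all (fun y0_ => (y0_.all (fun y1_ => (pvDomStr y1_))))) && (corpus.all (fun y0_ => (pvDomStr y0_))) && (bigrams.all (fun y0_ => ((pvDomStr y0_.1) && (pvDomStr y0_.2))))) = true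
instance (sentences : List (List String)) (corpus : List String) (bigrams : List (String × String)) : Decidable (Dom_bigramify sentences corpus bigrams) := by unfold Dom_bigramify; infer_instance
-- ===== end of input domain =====

-- B replaces A's rescan of the whole bigram list at every sentence position by a rank table
-- (pair ↦ earliest index in bigrams) built once, then picks the minimum-rank following word;
-- objective: faster. A mutates the sentence lists in place; the equivalence is about the return value.

-- Python's simultaneous swap statement 'xs[a], xs[b] = xs[b], xs[a]' (both indices in range
-- wherever the ports use it); exact: the right-hand side is read from the old list.
def pySwap (s : List String) (a b : Nat) : List String :=
  (s.set a (s.getD b "")).set b (s.getD a "")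

-- ===== PORT A =====
-- the inner 'for bigram in bigrams: … break' loop: second word of the first matching bigram
def aFind (w : String) (rest : List String) : List (String × String) → Option String
  | [] => none
  | b :: bs => if b.1 == w && rest.contains b.2 then some b.2 else aFind w rest bs

-- one iteration of 'for i in range(len(sentence) - 1)'
def aStep (corpus : List String) (bigrams : List (String × String)) (s : List String) (i : Nat) : List String :=
  match s[i]? with
  | none => s   -- unreachable: i < len(sentence) - 1 and the length is invariant under swaps
  | some w =>
    if corpus.contains w then
      match aFind w (s.drop (i+1)) bigrams with
      | some c => pySwap s (i+1) (i + 1 + List.idxOf c (s.drop (i+1)))  -- sentence[i+1:].index(c); c is a member here, so idxOf is its index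
      | none => s
    else s

def bigramify (sentences : List (List String)) (corpus : List String) (bigrams : List (String × String)) : List (List String) :=
  sentences.map (fun sentence => (List.range (sentence.length - 1)).foldl (aStep corpus bigrams) sentence)

-- ===== PORT B =====
-- 'for idx, pair in enumerate(bigrams): if pair not in rank: rank[pair] = idx'
def buildRank : List (String × String) → Nat → PySem.Dict (String × String) Int → PySem.Dict (String × String) Int
  | [], _, d => d
  | p :: ps, idx, d => buildRank ps (idx + 1) (if d.contains p then d else d.insert p (idx : Int))

-- the 'for cand in rest' minimum-rank scan; get cand = rank.get((w, cand))
def bScan (get : String → Option Int) : List String → Option (String × Int) → Option String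
  | [], acc => acc.map Prod.fst
  | c :: cs, acc =>
    match get c, acc with
    | none, _ => bScan get cs acc
    | some r, none => bScan get cs (some (c, r))
    | some r, some (bst, br) => bScan get cs (some (if r < br then (c, r) else (bst, br)))

def bStep (rank : PySem.Dict (String × String) Int) (cset : PySem.Set String) (s : List String) (i : Nat) : List String :=
  match s[i]? with
  | none => s   -- unreachable, as in port A
  | some w =>
    if cset.contains w then
      let rest := s.drop (i+1)
      match bScan (fun cand => rank.get? (w, cand)) rest none with
      | some best => pySwap s (i+1) (i + 1 + List.idxOf best rest)  -- rest.index(best); best is a member here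
      | none => s
    else s

def bigramify_alt (sentences : List (List String)) (corpus : List String) (bigrams : List (String × String)) : List (List String) :=
  let rank := buildRank bigrams 0 PySem.Dict.empty
  let cset := PySem.Set.ofList corpus
  sentences.map (fun old => (List.range (old.length - 1)).foldl (bStep rank cset) old)

-- ===== PRECONDITION & SPEC =====
def Spec_bigramify (sentences : List (List String)) (corpus : List String) (bigrams : List (String × String)) (out : List (List String)) : Prop := out = bigramify_alt sentences corpus bigrams
instance (sentences : List (List String)) (corpus : List String) (bigrams : List (String × String)) (out : List (List String)) : Decidable (Spec_bigramify sentences corpus bigrams out) := by unfold Spec_bigramify; infer_instance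

-- ===== CLAIM (what is proved, stated in full; the proofs are below) =====
def Claim_equal_bigramify : Prop := ∀ (sentences : List (List String)) (corpus : List String) (bigrams : List (String × String)), Dom_bigramify sentences corpus bigrams → Spec_bigramify sentences corpus bigrams (bigramify sentences corpus bigrams)

-- ===== LEMMAS AND PROOFS =====
theorem buildRank_get?' (bs : List (String × String)) : ∀ (i : Nat)
    (d : PySem.Dict (String × String) Int) (p : String × String),
    (buildRank bs i d).get? p
      = (d.get? p).or ((PySem.List.index? bs p).map (fun j => ((i + j : Nat) : Int))) := by
  induction bs with
  | nil => intro i d p; simp [buildRank, PySem.List.index?_eq_idxOf?]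
  | cons q qs ih =>
    intro i d p
    simp only [buildRank, ih]
    by_cases hpq : p = q
    · subst hpq
      rw [PySem.List.index?_cons_self]
      by_cases hc : d.contains p = true
      · rw [if_pos hc]
        rw [PySem.Dict.contains_eq_isSome_get?] at hc
        cases hg : d.get? p with
        | none => rw [hg] at hc; simp at hc
        | some v => simp
      · rw [if_neg hc]
        have hn : d.get? p = none := by
          rw [PySem.Dict.get?_eq_none_iff_contains]
          simpa using hc
        rw [hn, PySem.Dict.get?_insert_self]
        simp
    · rw [PySem.List.index?_cons_of_ne qs (Ne.symm hpq)]
      have harr : ∀ d' : PySem.Dict (String × String) Int, d'.get? p = d.get? p →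
          (d'.get? p).or ((PySem.List.index? qs p).map fun j => ((i + 1 + j : Nat) : Int))
          = (d.get? p).or (((PySem.List.index? qs p).map (· + 1)).map fun j => ((i + j : Nat) : Int)) := by
        intro d' h
        rw [h]
        cases d.get? p with
        | some v => simp
        | none =>
          simp only [Option.none_or]
          cases PySem.List.index? qs p with
          | none => rfl
          | some j =>
            simp only [Option.map_some]
            have : i + 1 + j = i + (j + 1) := by omega
            rw [this]
      by_cases hc : d.contains q = true
      · rw [if_pos hc]; exact harr d rfl
      · rw [if_neg hc]
        exact harr _ (PySem.Dict.get?_insert_of_ne d _ hpq)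

theorem bScan_congr (g g' : String → Option Int) : ∀ (rest : List String),
    (∀ c ∈ rest, g c = g' c) → ∀ (acc : Option (String × Int)),
    bScan g rest acc = bScan g' rest acc := by
  intro rest
  induction rest with
  | nil => intro _ acc; rfl
  | cons c cs ih =>
    intro h acc
    have hc : g c = g' c := h c (by simp)
    have h' : ∀ x ∈ cs, g x = g' x := fun x hx => h x (by simp [hx])
    cases hg : g' c with
    | none => simp only [bScan, hc, hg]; exact ih h' acc
    | some r =>
      cases acc with
      | none => simp only [bScan, hc, hg]; exact ih h' _
      | some pr =>
        obtain ⟨bst, br⟩ := pr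
        simp only [bScan, hc, hg]; exact ih h' _

theorem bScan_none (g : String → Option Int) : ∀ (rest : List String),
    (∀ c ∈ rest, g c = none) → ∀ (acc : Option (String × Int)),
    bScan g rest acc = acc.map Prod.fst := by
  intro rest
  induction rest with
  | nil => intro _ acc; rfl
  | cons c cs ih =>
    intro h acc
    simp only [bScan, h c (by simp)]
    exact ih (fun x hx => h x (by simp [hx])) acc

theorem bScan_shift (g : String → Option Int) : ∀ (rest : List String) (acc : Option (String × Int)),
    bScan (fun c => (g c).map (· + 1)) rest (acc.map (fun p => (p.1, p.2 + 1)))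
      = bScan g rest acc := by
  intro rest
  induction rest with
  | nil =>
    intro acc
    cases acc <;> simp [bScan]
  | cons c cs ih =>
    intro acc
    cases hg : g c with
    | none => simp only [bScan, hg, Option.map_none]; exact ih acc
    | some r =>
      cases acc with
      | none =>
        simp only [bScan, hg, Option.map_none, Option.map_some]
        simpa using ih (some (c, r))
      | some pr =>
        obtain ⟨bst, br⟩ := pr
        simp only [bScan, hg, Option.map_some]
        by_cases hlt : r < br
        · have h2 : r + 1 < br + 1 := by omega
          simp only [hlt, h2, if_true]
          simpa using ih (some (c, r))
        · have h2 : ¬ (r + 1 < br + 1) := by omega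
          simp only [hlt, h2, if_false]
          simpa using ih (some (bst, br))

theorem bScan_zero (g : String → Option Int) (b2 : String)
    (h0 : g b2 = some 0) (h1 : ∀ c r, g c = some r → c ≠ b2 → 1 ≤ r) :
    ∀ (rest : List String) (acc : Option (String × Int)),
    (b2 ∈ rest ∨ acc = some (b2, 0)) →
    (∀ c r, acc = some (c, r) → g c = some r) →
    bScan g rest acc = some b2 := by
  intro rest
  induction rest with
  | nil =>
    intro acc hmem hval
    rcases hmem with h | h
    · cases h
    · subst h; rfl
  | cons c cs ih =>
    intro acc hmem hval
    by_cases hc : c = b2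
    · cases acc with
      | none =>
        simp only [bScan, hc, h0]
        exact ih _ (Or.inr rfl) (by intro x r h; cases h; exact h0)
      | some pr =>
        obtain ⟨b, br⟩ := pr
        have hb : g b = some br := hval b br rfl
        simp only [bScan, hc, h0]
        by_cases h0b : (0 : Int) < br
        · simp only [h0b, if_true]
          exact ih _ (Or.inr rfl) (by intro x r h; cases h; exact h0)
        · have hbb : b = b2 := by
            by_contra hne
            have := h1 b br hb hne
            omega
          subst hbb
          have hbr : br = 0 := by rw [h0] at hb; cases hb; rfl
          subst hbr
          simp only [h0b, if_false]
          exact ih _ (Or.inr rfl) (by intro x r h; cases h; exact hb)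
    · cases hg : g c with
      | none =>
        simp only [bScan, hg]
        apply ih _ _ hval
        rcases hmem with h | h
        · rcases List.mem_cons.mp h with h' | h'
          · exact absurd h'.symm hc
          · exact Or.inl h'
        · exact Or.inr h
      | some r =>
        have hr : (1 : Int) ≤ r := h1 c r hg hc
        cases acc with
        | none =>
          simp only [bScan, hg]
          apply ih
          · rcases hmem with h | h
            · rcases List.mem_cons.mp h with h' | h'
              · exact absurd h'.symm hc
              · exact Or.inl h'
            · cases h
          · intro x r' h; cases h; exact hg
        | some pr =>
          obtain ⟨b, br⟩ := pr
          have hb : g b = some br := hval b br rfl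
          simp only [bScan, hg]
          by_cases hlt : r < br
          · simp only [hlt, if_true]
            apply ih
            · rcases hmem with h | h
              · rcases List.mem_cons.mp h with h' | h'
                · exact absurd h'.symm hc
                · exact Or.inl h'
              · -- acc = some (b2, 0): then br = 0 and r < 0, contradicting 1 ≤ r
                cases h
                rw [h0] at hb; cases hb
                omega
            · intro x r' h; cases h; exact hg
          · simp only [hlt, if_false]
            apply ih _ _ hval
            rcases hmem with h | h
            · rcases List.mem_cons.mp h with h' | h'
              · exact absurd h'.symm hc
              · exact Or.inl h'
            · exact Or.inr h

theorem bScan_eq_aFind (w : String) (rest : List String) : ∀ (bs : List (String × String)),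
    bScan (fun c => (PySem.List.index? bs (w, c)).map (fun j => (j : Int))) rest none
      = aFind w rest bs := by
  intro bs
  induction bs with
  | nil =>
    rw [bScan_none]
    · rfl
    · intro c _
      rw [PySem.List.index?_eq_idxOf?]
      simp
  | cons b bs ih =>
    obtain ⟨b1, b2⟩ := b
    by_cases hw : b1 = w
    · subst hw
      by_cases hmem : b2 ∈ rest
      · have haf : aFind b1 rest ((b1, b2) :: bs) = some b2 := by
          simp [aFind, hmem]
        rw [haf]
        apply bScan_zero _ b2 _ _ rest none (Or.inl hmem) (by intro c r h; cases h)
        · rw [PySem.List.index?_cons_self]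
          rfl
        · intro c r hgc hne
          have hbne : ((b1, b2) : String × String) ≠ (b1, c) := by
            intro h; exact hne (congrArg Prod.snd h).symm
          rw [PySem.List.index?_cons_of_ne bs hbne] at hgc
          cases hj : PySem.List.index? bs (b1, c) with
          | none => rw [hj] at hgc; cases hgc
          | some j =>
            rw [hj] at hgc
            simp only [Option.map_some] at hgc
            simp at hgc
            omega
      · have haf : aFind b1 rest ((b1, b2) :: bs) = aFind b1 rest bs := by
          simp [aFind, hmem]
        rw [haf, ← ih]
        rw [bScan_congr _ (fun c => ((PySem.List.index? bs (b1, c)).map (fun j => (j : Int))).map (· + 1)) rest ?_ none]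
        · simpa using bScan_shift (fun c => (PySem.List.index? bs (b1, c)).map (fun j => (j : Int))) rest none
        · intro c hcrest
          have hne : ((b1, b2) : String × String) ≠ (b1, c) := by
            intro h
            have hbc : b2 = c := congrArg Prod.snd h
            exact hmem (by rw [hbc]; exact hcrest)
          rw [PySem.List.index?_cons_of_ne bs hne]
          simp only [PySem.List.index?_eq_idxOf?]
          cases List.idxOf? (b1, c) bs <;> simp
    · have haf : aFind w rest ((b1, b2) :: bs) = aFind w rest bs := by
        simp [aFind, hw]
      rw [haf, ← ih]
      rw [bScan_congr _ (fun c => ((PySem.List.index? bs (w, c)).map (fun j => (j : Int))).map (· + 1)) rest ?_ none]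
      · simpa using bScan_shift (fun c => (PySem.List.index? bs (w, c)).map (fun j => (j : Int))) rest none
      · intro c _
        have hne : ((b1, b2) : String × String) ≠ (w, c) := by
          intro h; exact hw (congrArg Prod.fst h)
        rw [PySem.List.index?_cons_of_ne bs hne]
        simp only [PySem.List.index?_eq_idxOf?]
        cases List.idxOf? (w, c) bs <;> simp

theorem step_eq (corpus : List String) (bigrams : List (String × String)) :
    bStep (buildRank bigrams 0 PySem.Dict.empty) (PySem.Set.ofList corpus) = aStep corpus bigrams := by
  funext s i
  unfold bStep aStep
  cases s[i]? with
  | none => rfl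
  | some w =>
    have hmem : (PySem.Set.ofList corpus).contains w = corpus.contains w := by
      by_cases h : w ∈ corpus <;> simp [PySem.Set.contains, h, PySem.Set.mem_ofList]
    have hg : bScan (fun cand => (buildRank bigrams 0 PySem.Dict.empty).get? (w, cand)) (s.drop (i+1)) none
        = aFind w (s.drop (i+1)) bigrams := by
      rw [bScan_congr _ (fun c => (PySem.List.index? bigrams (w, c)).map (fun j => (j : Int))) _ ?_ none]
      · exact bScan_eq_aFind w (s.drop (i+1)) bigrams
      · intro c _
        rw [buildRank_get?']
        simp only [PySem.Dict.get?_empty, Option.none_or, Nat.zero_add]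
        cases PySem.List.index? bigrams (w, c) <;> rfl
    simp only [hmem, hg]

-- ===== VERDICT (by name: the statement is the Claim_ definition above) =====
theorem bigramify_spec : Claim_equal_bigramify := by
  intro sentences corpus bigrams _
  unfold Spec_bigramify bigramify bigramify_alt
  simp only [step_eq]
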